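-- pv_equiv track=rewrite | github.com/Jannxnn/SeedLang-V2 | bench/industry/sources/bench_industry.py | hash_map_ops_test
-- ===== SOURCE A (Python) =====
-- def hash_map_ops_test(n):
--     m = {}
--     for i in range(n):
--         key = str(i % 1000); m[key] = i
--     s = 0
--     for i in range(n):
--         key = str(i % 1000)
--         if key in m: s += m[key]
--     return len(m) * 10000 + s % 10000
-- ===== SOURCE B (Python) =====
-- def hash_map_ops_test(n):
--     # Aggregate per residue class instead of iterating all n indices:
--     # for each residue r < min(n, 1000), the dict holds the last index
--     # last = r + 1000*q (q = (n-r-1)//1000) and the class has q+1 members.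
--     k = min(n, 1000) if n > 0 else 0
--     s = 0
--     for r in range(k):
--         q = (n - r - 1) // 1000
--         s += (q + 1) * (r + 1000 * q)
--     return k * 10000 + s % 10000
-- ===== Notes on version B (the rewrite author's own statement) =====
-- stated objective: faster
-- what changed: Instead of building a 1000-key dict over n insertions and summing n lookups, B sums per residue class r < min(n,1000): each class contributes (count) * (last index) computed in closed form, so the dict and both O(n) loops disappear.
import Mathlib
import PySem

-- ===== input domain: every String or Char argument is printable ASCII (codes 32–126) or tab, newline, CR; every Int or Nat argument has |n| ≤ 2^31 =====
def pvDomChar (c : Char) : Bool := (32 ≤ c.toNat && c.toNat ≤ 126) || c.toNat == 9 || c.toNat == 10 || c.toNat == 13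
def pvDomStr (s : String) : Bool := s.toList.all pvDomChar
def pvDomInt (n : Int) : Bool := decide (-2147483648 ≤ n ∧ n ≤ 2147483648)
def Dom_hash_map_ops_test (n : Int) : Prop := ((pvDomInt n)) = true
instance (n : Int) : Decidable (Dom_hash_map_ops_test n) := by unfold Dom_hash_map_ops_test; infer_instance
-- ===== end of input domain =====

-- B replaces A's dict of n insertions and n lookups by a closed-form sum over the
-- at most 1000 residue classes (objective: faster, O(min(n,1000)) loop instead of O(n)).

-- ===== PORT A =====
def hash_map_ops_test (n : Int) : Int :=
  let m := (PySem.List.pyRange 0 n 1).foldl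
    (fun d i => d.insert (PySem.Int.toStr (PySem.Int.mod i 1000)) i)
    PySem.Dict.empty
  let s := (PySem.List.pyRange 0 n 1).foldl
    (fun s i =>
      let key := PySem.Int.toStr (PySem.Int.mod i 1000)
      if m.contains key then s + m.getD key 0 else s)
    0
  (m.size : Int) * 10000 + PySem.Int.mod s 10000

-- ===== PORT B =====
def hash_map_ops_test_alt (n : Int) : Int :=
  let k : Int := if 0 < n then min n 1000 else 0
  let s := (PySem.List.pyRange 0 k 1).foldl
    (fun s r =>
      let q := PySem.Int.floordiv (n - r - 1) 1000
      s + (q + 1) * (r + 1000 * q))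
    0
  k * 10000 + PySem.Int.mod s 10000

-- ===== PRECONDITION & SPEC =====
def Spec_hash_map_ops_test (n : Int) (out : Int) : Prop := out = hash_map_ops_test_alt n
instance (n : Int) (out : Int) : Decidable (Spec_hash_map_ops_test n out) := by unfold Spec_hash_map_ops_test; infer_instance

-- ===== CLAIM (what is proved, stated in full; the proofs are below) =====
def Claim_equal_hash_map_ops_test : Prop := ∀ (n : Int), Dom_hash_map_ops_test n → Spec_hash_map_ops_test n (hash_map_ops_test n)

-- ===== LEMMAS AND PROOFS =====

-- value m[str(r)] holds after the first loop over range(m): the last i < m with i % 1000 = r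
def pvLv (m r : Nat) : Int := (r : Int) + 1000 * (((m : Int) - 1 - r) / 1000)
-- number of i < m with i % 1000 = r (for r < min m 1000)
def pvCnt (m r : Nat) : Int := (((m : Int) - 1 - r) / 1000) + 1
-- the dict after the first loop, in closed form
def pvModel (m : Nat) : PySem.Dict String Int :=
  ⟨(List.range (min m 1000)).map (fun r : Nat => (PySem.Int.toStr (r : Int), pvLv m r))⟩

lemma pv_digitChar_inj : ∀ a < 10, ∀ b < 10, Nat.digitChar a = Nat.digitChar b → a = b := by
  decide

lemma pv_toDigits_ne_nil (n : Nat) : Nat.toDigits 10 n ≠ [] := by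
  rw [Nat.toDigits_eq_if (by norm_num)]
  split <;> simp

lemma pv_toDigits_inj : ∀ a b : Nat, Nat.toDigits 10 a = Nat.toDigits 10 b → a = b := by
  intro a
  induction a using Nat.strong_induction_on with
  | _ a ih =>
    intro b h
    rw [Nat.toDigits_eq_if (by norm_num)] at h
    rw [Nat.toDigits_eq_if (n := b) (by norm_num)] at h
    split at h
    · split at h
      · exact pv_digitChar_inj a (by omega) b (by omega) (by simpa using h)
      · exfalso
        have hl := congrArg List.length h
        simp only [List.length_append, List.length_cons, List.length_nil] at hl
        exact pv_toDigits_ne_nil (b / 10) (List.length_eq_zero_iff.mp (by omega))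
    · split at h
      · exfalso
        have hl := congrArg List.length h
        simp only [List.length_append, List.length_cons, List.length_nil] at hl
        exact pv_toDigits_ne_nil (a / 10) (List.length_eq_zero_iff.mp (by omega))
      · have hlen : [(a % 10).digitChar].length = [(b % 10).digitChar].length := by simp
        obtain ⟨h1, h2⟩ := List.append_inj' h hlen
        have hd : a / 10 = b / 10 := ih (a / 10) (by omega) _ h1
        have hm : a % 10 = b % 10 :=
          pv_digitChar_inj _ (by omega) _ (by omega) (by simpa using h2)
        omega

lemma pv_toStr_inj (a b : Nat) (h : PySem.Int.toStr (a : Int) = PySem.Int.toStr (b : Int)) : a = b := by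
  have h2 := congrArg String.toList h
  rw [PySem.Int.toList_toStr, PySem.Int.toList_toStr] at h2
  unfold PySem.Int.toChars at h2
  simp only [if_neg (by omega : ¬ ((a : Int) < 0)), if_neg (by omega : ¬ ((b : Int) < 0)),
    Int.toNat_natCast] at h2
  exact pv_toDigits_inj a b h2

lemma pv_mod_cast (k : Nat) : PySem.Int.mod (k : Int) 1000 = ((k % 1000 : Nat) : Int) := by
  exact_mod_cast PySem.Int.mod_natCast k 1000

-- after m iterations the build loop produces exactly pvModel m
lemma pv_first_loop : ∀ m : Nat,
    (List.range m).foldl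
      (fun d k => d.insert (PySem.Int.toStr ((k % 1000 : Nat) : Int)) (k : Int))
      PySem.Dict.empty
    = pvModel m := by
  intro m
  induction m with
  | zero => rfl
  | succ m ih =>
    rw [List.range_succ, List.foldl_append, List.foldl_cons, List.foldl_nil, ih]
    by_cases hm : m < 1000
    · -- fresh key: append
      have hmod : m % 1000 = m := Nat.mod_eq_of_lt hm
      have hcon : (pvModel m).contains (PySem.Int.toStr ((m % 1000 : Nat) : Int)) = false := by
        unfold pvModel
        rw [PySem.Dict.contains_mk]
        apply List.any_eq_false.mpr
        intro p hp
        simp only [List.mem_map, List.mem_range] at hp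
        obtain ⟨r, hr, rfl⟩ := hp
        intro hkey
        have := pv_toStr_inj r (m % 1000) (eq_of_beq hkey)
        omega
      apply PySem.Dict.ext
      rw [PySem.Dict.items_insert]
      simp only [hcon, Bool.false_eq_true, if_false]
      unfold pvModel
      have h1 : min (m + 1) 1000 = (min m 1000) + 1 := by omega
      rw [h1, List.range_succ, List.map_append]
      congr 1
      · apply List.map_congr_left
        intro r hr
        simp only [List.mem_range] at hr
        have : pvLv (m + 1) r = pvLv m r := by
          unfold pvLv; push_cast; congr 1; omega
        rw [this]
      · have hmin : min m 1000 = m := by omega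
        simp only [List.map_cons, List.map_nil, hmin, hmod]
        have : pvLv (m + 1) m = (m : Int) := by
          unfold pvLv; push_cast; omega
        rw [this]
    · -- existing key: overwrite in place
      have hcon : (pvModel m).contains (PySem.Int.toStr ((m % 1000 : Nat) : Int)) = true := by
        unfold pvModel
        rw [PySem.Dict.contains_mk]
        rw [List.any_eq_true]
        refine ⟨(PySem.Int.toStr ((m % 1000 : Nat) : Int), pvLv m (m % 1000)), ?_, by simp⟩
        simp only [List.mem_map, List.mem_range]
        exact ⟨m % 1000, by omega, rfl⟩
      apply PySem.Dict.ext
      rw [PySem.Dict.items_insert]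
      simp only [hcon, if_true]
      unfold pvModel
      have h1 : min (m + 1) 1000 = min m 1000 := by omega
      rw [h1, List.map_map]
      apply List.map_congr_left
      intro r hr
      simp only [List.mem_range] at hr
      simp only [Function.comp_apply]
      by_cases hr2 : r = m % 1000
      · subst hr2
        simp only [beq_self_eq_true, if_true]
        have : pvLv (m + 1) (m % 1000) = (m : Int) := by
          unfold pvLv; push_cast; omega
        rw [this]
      · have hne : (PySem.Int.toStr (r : Int) == PySem.Int.toStr ((m % 1000 : Nat) : Int)) = false := by
          simp only [beq_eq_false_iff_ne, ne_eq]
          intro hkey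
          exact hr2 (pv_toStr_inj r (m % 1000) hkey)
        simp only [hne, Bool.false_eq_true, if_false]
        have : pvLv (m + 1) r = pvLv m r := by
          unfold pvLv; push_cast; congr 1; omega
        rw [this]

lemma pv_model_nodup (m : Nat) : (pvModel m).keys.Nodup := by
  unfold pvModel
  rw [PySem.Dict.keys_mk, List.map_map]
  have : ((fun x : String × Int => x.1) ∘ fun r : Nat => (PySem.Int.toStr (r : Int), pvLv m r))
      = fun r : Nat => PySem.Int.toStr (r : Int) := rfl
  rw [this]
  exact (List.nodup_range).map (fun a b h => pv_toStr_inj a b h)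

lemma pv_model_contains (m r : Nat) (hr : r < min m 1000) :
    (pvModel m).contains (PySem.Int.toStr (r : Int)) = true := by
  unfold pvModel
  rw [PySem.Dict.contains_mk, List.any_eq_true]
  refine ⟨(PySem.Int.toStr (r : Int), pvLv m r), ?_, by simp⟩
  simp only [List.mem_map, List.mem_range]
  exact ⟨r, hr, rfl⟩

lemma pv_model_getD (m r : Nat) (hr : r < min m 1000) :
    (pvModel m).getD (PySem.Int.toStr (r : Int)) 0 = pvLv m r := by
  apply PySem.Dict.getD_of_mem_items _ _ (pv_model_nodup m)
  unfold pvModel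
  simp only [List.mem_map, List.mem_range]
  exact ⟨r, hr, rfl⟩

-- generic: changing one entry of a sum over range k
lemma pv_sum_shift (g h : Nat → Int) (c : Int) : ∀ (k t : Nat), t < k →
    (∀ r, r < k → r ≠ t → g r = h r) → g t = h t + c →
    ((List.range k).map g).sum = ((List.range k).map h).sum + c := by
  intro k
  induction k with
  | zero => intro t ht _ _; exact absurd ht (Nat.not_lt_zero t)
  | succ k ih =>
    intro t ht he htt
    rw [List.range_succ, List.map_append, List.map_append, List.sum_append, List.sum_append]
    by_cases hk : t = k
    · have hsum : ((List.range k).map g).sum = ((List.range k).map h).sum := by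
        congr 1
        apply List.map_congr_left
        intro r hr
        simp only [List.mem_range] at hr
        exact he r (by omega) (by omega)
      have hgk : g k = h k + c := by rw [← hk]; exact htt
      simp only [List.map_cons, List.map_nil, List.sum_cons, List.sum_nil]
      rw [hsum, hgk]; ring
    · have hgk : g k = h k := he k (by omega) (fun hkk => hk hkk.symm)
      rw [ih t (by omega) (fun r hr hrt => he r (by omega) hrt) htt]
      simp only [List.map_cons, List.map_nil, List.sum_cons, List.sum_nil]
      rw [hgk]; ring

-- regrouping a sum over i < m by residue class i % 1000
lemma pv_regroup (f : Nat → Int) : ∀ m : Nat,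
    ((List.range m).map (fun k => f (k % 1000))).sum
    = ((List.range (min m 1000)).map (fun r => pvCnt m r * f r)).sum := by
  intro m
  induction m with
  | zero => rfl
  | succ m ih =>
    rw [List.range_succ, List.map_append, List.sum_append]
    simp only [List.map_cons, List.map_nil, List.sum_cons, List.sum_nil, add_zero]
    rw [ih]
    by_cases hm : m < 1000
    · have h1 : min (m + 1) 1000 = (min m 1000) + 1 := by omega
      have hmod : m % 1000 = m := Nat.mod_eq_of_lt hm
      rw [h1, List.range_succ, List.map_append, List.sum_append]
      have hmin : min m 1000 = m := by omega
      simp only [List.map_cons, List.map_nil, List.sum_cons, List.sum_nil, add_zero, hmin, hmod]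
      have hc : pvCnt (m + 1) m = 1 := by unfold pvCnt; push_cast; omega
      have hsum : ((List.range m).map (fun r => pvCnt (m + 1) r * f r)).sum
          = ((List.range m).map (fun r => pvCnt m r * f r)).sum := by
        congr 1
        apply List.map_congr_left
        intro r hr
        simp only [List.mem_range] at hr
        have : pvCnt (m + 1) r = pvCnt m r := by unfold pvCnt; push_cast; congr 1; omega
        rw [this]
      rw [hsum, hc]
      ring
    · have h1 : min (m + 1) 1000 = min m 1000 := by omega
      rw [h1]
      have key := pv_sum_shift (fun r => pvCnt (m + 1) r * f r) (fun r => pvCnt m r * f r)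
          (f (m % 1000)) (min m 1000) (m % 1000) (by omega)
          (by
            intro r hr hrt
            have hcc : pvCnt (m + 1) r = pvCnt m r := by
              unfold pvCnt; congr 1; push_cast; omega
            simp only [hcc])
          (by
            have hcc : pvCnt (m + 1) (m % 1000) = pvCnt m (m % 1000) + 1 := by
              unfold pvCnt; push_cast; omega
            simp only [hcc]; ring)
      rw [key]

-- ===== VERDICT (by name: the statement is the Claim_ definition above) =====
theorem hash_map_ops_test_spec : Claim_equal_hash_map_ops_test := by
  intro n _
  unfold Spec_hash_map_ops_test hash_map_ops_test hash_map_ops_test_alt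
  by_cases hn : 0 < n
  · -- n > 0
    have hk : (if 0 < n then min n 1000 else 0) = min n 1000 := if_pos hn
    rw [hk]
    set m : Nat := n.toNat with hm
    have hnm : n = (m : Int) := by omega
    -- rewrite A's two loops over pyRange 0 n into loops over List.range m
    rw [PySem.List.pyRange_one 0 n]
    simp only [zero_add, Int.sub_zero, List.foldl_map]
    simp only [pv_mod_cast]
    rw [pv_first_loop m]
    -- the accumulation loop: condition always true, value is pvLv
    have hloop : (List.range m).foldl
        (fun s (k : Nat) =>
          if (pvModel m).contains (PySem.Int.toStr ((k % 1000 : Nat) : Int))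
          then s + (pvModel m).getD (PySem.Int.toStr ((k % 1000 : Nat) : Int)) 0 else s) 0
        = ((List.range m).map (fun k => pvLv m (k % 1000))).sum := by
      rw [PySem.List.foldl_congr_mem _ _ (fun s (k : Nat) => s + pvLv m (k % 1000)) 0]
      · rw [PySem.List.foldl_add _ _ 0, zero_add]
      · intro acc k hkmem
        simp only [List.mem_range] at hkmem
        have hr : k % 1000 < min m 1000 := by omega
        rw [pv_model_contains m _ hr, pv_model_getD m _ hr]
        simp
    rw [hloop, pv_regroup (fun r => pvLv m r) m]
    -- B's side: loop over pyRange 0 (min n 1000)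
    have hkm : ((min n 1000) - 0).toNat = min m 1000 := by omega
    rw [PySem.List.pyRange_one 0 (min n 1000), hkm]
    simp only [zero_add, List.foldl_map]
    have hb : (List.range (min m 1000)).foldl
        (fun s (r : Nat) =>
          s + (PySem.Int.floordiv (n - (r : Int) - 1) 1000 + 1)
            * ((r : Int) + 1000 * PySem.Int.floordiv (n - (r : Int) - 1) 1000)) 0
        = ((List.range (min m 1000)).map (fun r => pvCnt m r * pvLv m r)).sum := by
      rw [PySem.List.foldl_congr_mem _ _ (fun s (r : Nat) => s + pvCnt m r * pvLv m r) 0]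
      · rw [PySem.List.foldl_add _ _ 0, zero_add]
      · intro acc r hrmem
        simp only [List.mem_range] at hrmem
        rw [PySem.Int.floordiv_eq_ediv_of_pos (by norm_num)]
        unfold pvCnt pvLv
        have harg : n - (r : Int) - 1 = (m : Int) - 1 - (r : Int) := by omega
        rw [harg]
      -- done
    rw [hb]
    -- sizes agree
    have hsize : ((pvModel m).size : Int) = min n 1000 := by
      unfold pvModel PySem.Dict.size
      simp only [List.length_map, List.length_range]
      push_cast [Nat.cast_min]
      omega
    rw [hsize]
  · -- n ≤ 0: both programs return 0
    have hk : (if 0 < n then min n 1000 else 0) = 0 := if_neg hn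
    rw [hk]
    rw [PySem.List.pyRange_one_eq_nil (by omega : n ≤ 0)]
    simp [PySem.List.pyRange_one_eq_nil (le_refl (0:Int)), PySem.Dict.size, PySem.Dict.empty,
      PySem.Int.mod]
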